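-- pv_equiv track=rewrite | github.com/MrBrantCode/unitest_baseline | mut_generate/mist_train_cf/cf_92669/solution.py | process_word_list
-- ===== SOURCE A (Python) =====
-- import concurrent.futures
--
-- def process_word_list(words):
--     # Function to process each word and return its length
--     def process_word(word):
--         return len(word)
--
--     # Create a thread pool executor
--     with concurrent.futures.ThreadPoolExecutor() as executor:
--         # Process each word in parallel
--         word_lengths = list(executor.map(process_word, words))
--
--     # Create a dictionary containing word lengths
--     word_lengths_dict = dict(zip(words, word_lengths))
--
--     # Filter words with at least 5 characters
--     filtered_dict = {word: length for word, length in word_lengths_dict.items() if length >= 5}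
--
--     # Sort the dictionary in descending order based on the number of characters
--     sorted_dict = dict(sorted(filtered_dict.items(), key=lambda x: x[1], reverse=True))
--
--     return sorted_dict
-- ===== SOURCE B (Python) =====
-- def process_word_list(words):
--     # Keep the first occurrence of each word of length >= 5, in order.
--     kept = {}
--     for w in words:
--         if len(w) >= 5 and w not in kept:
--             kept[w] = len(w)
--
--     if not kept:
--         return {}
--
--     # Bucket the kept words by length, preserving their order.
--     buckets = {}
--     for w, n in kept.items():
--         buckets.setdefault(n, []).append(w)
--
--     # Emit buckets from the longest length down to 5 (counting sort).
--     top = max(buckets)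
--     pairs = []
--     for n in range(top, 4, -1):
--         for w in buckets.get(n, []):
--             pairs.append((w, n))
--     return dict(pairs)
-- ===== Notes on version B (the rewrite author's own statement) =====
-- stated objective: alternative
-- what changed: B replaces A's dict(zip)+dict-comprehension+comparison sort (sorted key=len reverse=True) by a single dedupe-and-filter pass followed by a counting/bucket sort: words are grouped into per-length buckets and emitted from the maximum length down to 5.
import Mathlib
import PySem

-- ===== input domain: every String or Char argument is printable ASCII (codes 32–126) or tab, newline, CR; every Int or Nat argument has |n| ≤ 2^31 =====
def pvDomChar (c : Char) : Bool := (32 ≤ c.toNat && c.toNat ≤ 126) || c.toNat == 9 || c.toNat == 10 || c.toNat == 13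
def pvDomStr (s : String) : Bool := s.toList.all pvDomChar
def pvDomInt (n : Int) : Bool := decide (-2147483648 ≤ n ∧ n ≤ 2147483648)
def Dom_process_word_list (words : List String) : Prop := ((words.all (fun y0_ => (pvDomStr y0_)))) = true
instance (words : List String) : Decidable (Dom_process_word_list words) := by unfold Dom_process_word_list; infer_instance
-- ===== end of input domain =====

-- B replaces A's comparison sort (sorted with key=length, reverse=True) by a single-pass
-- dedupe-and-filter followed by a counting/bucket sort over the lengths (objective: alternative).

-- ===== PORT A =====
-- (the ThreadPoolExecutor map is just words.map len; parallelism does not change the result)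
def process_word_list (words : List String) : List (String × Int) :=
  let word_lengths := words.map (fun w => PySem.Str.len w)
  let word_lengths_dict : PySem.Dict String Int := PySem.Dict.ofList (words.zip word_lengths)
  let filtered_dict : PySem.Dict String Int :=
    PySem.Dict.ofList (word_lengths_dict.items.filter (fun p => 5 ≤ p.2))
  let sorted_dict : PySem.Dict String Int :=
    PySem.Dict.ofList (PySem.List.sorted filtered_dict.items (fun p => p.2) true)
  sorted_dict.items

-- ===== PORT B =====
-- ('buckets.setdefault(n, []).append(w)' is exactly Dict.modify n [] (· ++ [w]))
def process_word_list_alt (words : List String) : List (String × Int) :=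
  let kept : PySem.Dict String Int :=
    words.foldl (fun d w =>
      if 5 ≤ PySem.Str.len w ∧ d.contains w = false
      then d.insert w (PySem.Str.len w) else d) PySem.Dict.empty
  if kept.items = [] then
    []
  else
    let buckets : PySem.Dict Int (List String) :=
      kept.items.foldl (fun d p => d.modify p.2 [] (fun l => l ++ [p.1])) PySem.Dict.empty
    let top : Int := (PySem.List.max? buckets.keys (fun y => y)).getD 0
    let pairs : List (String × Int) :=
      (PySem.List.pyRange top 4 (-1)).foldl (fun acc n =>
        (buckets.getD n []).foldl (fun acc w => acc ++ [(w, n)]) acc) []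
    (PySem.Dict.ofList pairs).items

-- ===== PRECONDITION & SPEC =====
def Spec_process_word_list (words : List String) (out : List (String × Int)) : Prop := out = process_word_list_alt words
instance (words : List String) (out : List (String × Int)) : Decidable (Spec_process_word_list words out) := by unfold Spec_process_word_list; infer_instance

-- ===== CLAIM (what is proved, stated in full; the proofs are below) =====
def Claim_equal_process_word_list : Prop := ∀ (words : List String), Dom_process_word_list words → Spec_process_word_list words (process_word_list words)

-- ===== LEMMAS AND PROOFS =====

-- The filtered, first-occurrence-deduplicated (word, length) list both programs boil down to.
def pvP (words : List String) : List (String × Int) :=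
  ((PySem.List.dedup words).filter (fun w => decide (5 ≤ PySem.Str.len w))).map
    (fun w => (w, PySem.Str.len w))

-- ofList of a list with Nodup keys keeps the items as they are.
theorem pv_items_ofList {L : List (String × Int)} (h : (L.map (·.1)).Nodup) :
    (PySem.Dict.ofList L).items = L := by
  show (List.foldl (fun acc p => acc.insert p.1 p.2) PySem.Dict.empty L).items = L
  rw [PySem.Dict.items_foldl_insert_fresh L (fun p => p.1) (fun p => p.2) PySem.Dict.empty
    (fun a _ => PySem.Dict.contains_empty a.1) h]
  simp [PySem.Dict.empty]

-- dict(zip(words, lengths)): duplicates overwrite with the same value, so the items are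
-- the first-occurrence dedup, mapped through (w, len w).
theorem pv_base_items (words : List String) :
    (PySem.Dict.ofList (words.map (fun w => (w, PySem.Str.len w)))).items =
      (PySem.List.dedup words).map (fun w => (w, PySem.Str.len w)) := by
  induction words using List.reverseRecOn with
  | nil => simp [PySem.Dict.ofList, PySem.Dict.update, PySem.Dict.empty, PySem.List.dedup, PySem.Set.ofList]
  | append_singleton p w ih =>
    rw [PySem.List.dedup_eq_ofList] at ih ⊢
    rw [PySem.Set.ofList_append_singleton]
    show (List.foldl (fun acc q => acc.insert q.1 q.2) PySem.Dict.empty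
        ((p ++ [w]).map (fun w => (w, PySem.Str.len w)))).items = _
    rw [List.map_append, List.foldl_append]
    simp only [List.map_cons, List.map_nil, List.foldl_cons, List.foldl_nil]
    have hk : (List.foldl (fun acc q => acc.insert q.1 q.2) PySem.Dict.empty
        (p.map (fun w => (w, PySem.Str.len w)))).keys = PySem.Set.ofList p := by
      show (PySem.Dict.ofList (p.map (fun w => (w, PySem.Str.len w)))).keys = _
      unfold PySem.Dict.keys
      rw [ih, List.map_map]
      exact List.map_id'' (congrFun rfl) _
    by_cases hmem : w ∈ PySem.Set.ofList p
    · have hc : (List.foldl (fun acc q => acc.insert q.1 q.2) PySem.Dict.empty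
          (p.map (fun w => (w, PySem.Str.len w)))).contains w = true := by
        rw [PySem.Dict.contains_iff_mem_keys, hk]; exact hmem
      rw [PySem.Dict.items_insert_of_contains _ _ hc]
      show List.map _ (PySem.Dict.ofList (p.map (fun w => (w, PySem.Str.len w)))).items = _
      rw [ih, List.map_map, PySem.Set.add_of_mem hmem]
      refine List.map_congr_left (fun u _ => ?_)
      by_cases hu : u = w
      · subst hu; simp
      · simp [hu]
    · have hc : (List.foldl (fun acc q => acc.insert q.1 q.2) PySem.Dict.empty
          (p.map (fun w => (w, PySem.Str.len w)))).contains w = false := by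
        rw [← Bool.not_eq_true, PySem.Dict.contains_iff_mem_keys, hk]; simpa using hmem
      rw [PySem.Dict.items_insert_of_not_contains _ _ hc]
      show (PySem.Dict.ofList (p.map (fun w => (w, PySem.Str.len w)))).items ++ _ = _
      rw [ih, PySem.Set.add_of_not_mem hmem, List.map_append]
      simp

-- B's kept dict: first occurrences of the qualifying words, in order.
theorem pv_kept_items (words : List String) :
    (words.foldl (fun d w =>
      if 5 ≤ PySem.Str.len w ∧ d.contains w = false
      then d.insert w (PySem.Str.len w) else d) PySem.Dict.empty).items = pvP words := by
  induction words using List.reverseRecOn with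
  | nil => simp [pvP, PySem.Dict.empty, PySem.List.dedup, PySem.Set.ofList]
  | append_singleton p w ih =>
    rw [List.foldl_append]
    simp only [List.foldl_cons, List.foldl_nil]
    set d := p.foldl (fun d w =>
      if 5 ≤ PySem.Str.len w ∧ d.contains w = false
      then d.insert w (PySem.Str.len w) else d) PySem.Dict.empty with hd
    have hkeys : d.keys = (PySem.Set.ofList p).filter (fun w => decide (5 ≤ PySem.Str.len w)) := by
      unfold PySem.Dict.keys
      rw [ih]
      simp only [pvP, PySem.List.dedup_eq_ofList, List.map_map]
      exact List.map_id'' (congrFun rfl) _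
    have hP : pvP (p ++ [w]) =
        ((PySem.Set.add (PySem.Set.ofList p) w).filter (fun w => decide (5 ≤ PySem.Str.len w))).map
          (fun w => (w, PySem.Str.len w)) := by
      simp [pvP, PySem.List.dedup_eq_ofList, PySem.Set.ofList_append_singleton]
    by_cases hq : 5 ≤ PySem.Str.len w
    · by_cases hmem : w ∈ PySem.Set.ofList p
      · have hc : d.contains w = true := by
          rw [PySem.Dict.contains_iff_mem_keys, hkeys]
          rw [List.mem_filter]
          exact ⟨hmem, by simpa using hq⟩
        rw [if_neg (by simp [hc])]
        rw [ih, hP, PySem.Set.add_of_mem hmem]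
        simp [pvP, PySem.List.dedup_eq_ofList]
      · have hc : d.contains w = false := by
          rw [← Bool.not_eq_true, PySem.Dict.contains_iff_mem_keys, hkeys, List.mem_filter]
          intro ⟨h1, _⟩; exact hmem h1
        rw [if_pos ⟨hq, hc⟩, PySem.Dict.items_insert_of_not_contains _ _ hc, ih, hP,
          PySem.Set.add_of_not_mem hmem, List.filter_append]
        simp only [PySem.Str.len_eq, String.length_toList] at hq
        have hq' : 5 ≤ w.length := by exact_mod_cast hq
        simp [pvP, PySem.List.dedup_eq_ofList, hq']
    · have step : (if 5 ≤ PySem.Str.len w ∧ d.contains w = false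
          then d.insert w (PySem.Str.len w) else d) = d := by
        rw [if_neg]; intro ⟨h1, _⟩; exact hq h1
      rw [step, ih, hP]
      by_cases hmem : w ∈ PySem.Set.ofList p
      · rw [PySem.Set.add_of_mem hmem]
        simp [pvP, PySem.List.dedup_eq_ofList]
      · rw [PySem.Set.add_of_not_mem hmem, List.filter_append]
        simp only [PySem.Str.len_eq, String.length_toList] at hq
        simp [pvP, PySem.List.dedup_eq_ofList]
        omega

theorem pv_keys_pvP (words : List String) :
    (pvP words).map (·.1) = (PySem.List.dedup words).filter (fun w => decide (5 ≤ PySem.Str.len w)) := by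
  simp only [pvP, List.map_map]
  exact List.map_id'' (congrFun rfl) _

theorem pv_nodup_keys_pvP (words : List String) : ((pvP words).map (·.1)).Nodup := by
  rw [pv_keys_pvP]
  exact (PySem.List.nodup_dedup words).filter _

theorem pv_nodup_keys_sorted (words : List String) :
    ((PySem.List.sorted (pvP words) (fun p => p.2) true).map (·.1)).Nodup :=
  ((PySem.List.sorted_perm (pvP words) (fun p => p.2) true).map (·.1)).nodup_iff.mpr
    (pv_nodup_keys_pvP words)

-- insertBy skips a block it should not go before.
theorem pv_insertBy_append {α : Type} (before : α → α → Bool) (x : α) (l r : List α)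
    (h : ∀ y ∈ l, before x y = false) :
    PySem.List.insertBy before x (l ++ r) = l ++ PySem.List.insertBy before x r := by
  induction l with
  | nil => simp
  | cons y ys ih =>
    rw [List.cons_append, PySem.List.insertBy.eq_def]
    simp only [h y (by simp), Bool.false_eq_true, if_false]
    rw [ih (fun z hz => h z (by simp [hz]))]
    simp

-- insertBy stops in front of a block it goes before everywhere.
theorem pv_insertBy_front {α : Type} (before : α → α → Bool) (x : α) (r : List α)
    (h : ∀ y ∈ r, before x y = true) :
    PySem.List.insertBy before x r = x :: r := by
  cases r with
  | nil => rfl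
  | cons y ys => rw [PySem.List.insertBy.eq_def]; simp [h y (by simp)]

-- Stable reverse insertion into a descending bucket concatenation appends to x's bucket.
theorem pv_insert_buckets (x : String × Int) (ks : List Int)
    (g : Int → List (String × Int))
    (hg : ∀ k, ∀ p ∈ g k, p.2 = k)
    (hx : x.2 ∈ ks) (hks : ks.Pairwise (· > ·)) :
    PySem.List.insertBy (fun a b => decide (b.2 < a.2)) x (ks.flatMap g) =
      ks.flatMap (fun k => g k ++ if x.2 = k then [x] else []) := by
  induction ks with
  | nil => cases hx
  | cons k ks ih =>
    rw [List.pairwise_cons] at hks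
    rw [List.flatMap_cons, List.flatMap_cons]
    by_cases hxk : x.2 = k
    · rw [pv_insertBy_append _ _ _ _ (fun y hy => by
        simp [hg k y hy, hxk])]
      have hfront : PySem.List.insertBy (fun a b => decide (b.2 < a.2)) x (ks.flatMap g) =
          x :: ks.flatMap g := by
        refine pv_insertBy_front _ _ _ (fun y hy => ?_)
        rw [List.mem_flatMap] at hy
        obtain ⟨k', hk', hy⟩ := hy
        have := hg k' y hy
        have hlt : k' < k := hks.1 k' hk'
        simp [this, hxk]
        omega
      rw [hfront]
      have htail : ks.flatMap (fun k' => g k' ++ if x.2 = k' then [x] else []) = ks.flatMap g := by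
        refine List.flatMap_congr (fun k' hk' => ?_)
        have : x.2 ≠ k' := by have := hks.1 k' hk'; omega
        simp [this]
      rw [htail, if_pos hxk]
      simp
    · have hx' : x.2 ∈ ks := by cases hx with
        | head => exact absurd rfl hxk
        | tail _ h => exact h
      rw [pv_insertBy_append _ _ _ _ (fun y hy => by
        have hyk := hg k y hy
        have hlt : x.2 < k := lt_of_le_of_ne (by
          have := hks.1 x.2 hx'; omega) hxk
        simp [hyk]; omega)]
      rw [ih hx' hks.2, if_neg hxk]
      simp

-- The central lemma: Python's stable sorted(…, key=len, reverse=True) is the bucket concatenation.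
theorem pv_sorted_eq_buckets (P : List (String × Int)) (ks : List Int)
    (hks : ks.Pairwise (· > ·)) (hmem : ∀ p ∈ P, p.2 ∈ ks) :
    PySem.List.sorted P (fun p => p.2) true =
      ks.flatMap (fun k => P.filter (fun p => p.2 == k)) := by
  induction P using List.reverseRecOn with
  | nil =>
    rw [(PySem.List.sorted_eq_nil_iff _ _ _).mpr rfl]
    simp
  | append_singleton P x ih =>
    rw [PySem.List.sorted_rev_eq_foldl_insertBy, List.foldl_append]
    simp only [List.foldl_cons, List.foldl_nil]
    rw [← PySem.List.sorted_rev_eq_foldl_insertBy]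
    rw [ih (fun p hp => hmem p (by simp [hp]))]
    rw [pv_insert_buckets x ks _ (fun k p hp => by
        rw [List.mem_filter] at hp; exact beq_iff_eq.mp hp.2)
      (hmem x (by simp)) hks]
    refine List.flatMap_congr (fun k hk => ?_)
    rw [List.filter_append]
    by_cases hxk : x.2 = k
    · simp [hxk]
    · simp [hxk]

theorem pv_A_eq (words : List String) :
    process_word_list words = PySem.List.sorted (pvP words) (fun p => p.2) true := by
  show (PySem.Dict.ofList (PySem.List.sorted
      (PySem.Dict.ofList ((PySem.Dict.ofList
        (words.zip (words.map (fun w => PySem.Str.len w)))).items.filter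
          (fun p => 5 ≤ p.2))).items (fun p => p.2) true)).items = _
  rw [← List.map_prod_left_eq_zip, pv_base_items]
  have hfil : ((PySem.List.dedup words).map (fun w => (w, PySem.Str.len w))).filter
      (fun p => decide (5 ≤ p.2)) = pvP words := by
    rw [List.filter_map]
    rfl
  rw [hfil, pv_items_ofList (pv_nodup_keys_pvP words),
    pv_items_ofList (pv_nodup_keys_sorted words)]

theorem pv_B_eq (words : List String) (h : pvP words ≠ []) :
    process_word_list_alt words = PySem.List.sorted (pvP words) (fun p => p.2) true := by
  simp only [process_word_list_alt]
  rw [pv_kept_items words, if_neg h]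
  set P := pvP words with hPdef
  set buckets : PySem.Dict Int (List String) :=
    P.foldl (fun d p => d.modify p.2 [] (fun l => l ++ [p.1])) PySem.Dict.empty with hbuckets
  -- bucket lookups
  have hgetD : ∀ n : Int, buckets.getD n [] = (P.filter (fun p => p.2 == n)).map (·.1) := by
    intro n
    have hswap : buckets = (P.map Prod.swap).foldl
        (fun d p => d.modify p.1 [] (fun l => l ++ [p.2])) PySem.Dict.empty := by
      rw [List.foldl_map]
      rfl
    rw [hswap, PySem.Dict.getD_foldl_modify_append, PySem.Dict.getD_empty]
    rw [List.filter_map, List.map_map]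
    have : ((fun p : Int × String => p.1 == n) ∘ Prod.swap) = (fun p : String × Int => p.2 == n) := rfl
    rw [this]
    rfl
  -- bucket keys
  have hkeys : buckets.keys = PySem.Set.ofList (P.map (fun p => p.2)) := by
    rw [hbuckets, PySem.Dict.keys_foldl_modify_key P (fun p => p.2) []
      (fun d p => fun l => l ++ [p.1]) PySem.Dict.empty, PySem.Dict.keys_empty,
      PySem.Set.ofList_eq_foldl]
    rfl
  have hP5 : ∀ p ∈ P, 5 ≤ p.2 := by
    intro p hp
    rw [hPdef] at hp
    simp only [pvP, List.mem_map, List.mem_filter] at hp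
    obtain ⟨w, ⟨_, hw⟩, rfl⟩ := hp
    simpa using of_decide_eq_true hw
  -- the maximum
  obtain ⟨p0, hp0⟩ := List.exists_mem_of_ne_nil _ h
  have hknil : buckets.keys ≠ [] := by
    rw [hkeys]
    intro hcon
    have : p0.2 ∈ PySem.Set.ofList (P.map (fun p => p.2)) := by
      rw [PySem.Set.mem_ofList]
      exact List.mem_map_of_mem hp0
    rw [hcon] at this
    cases this
  obtain ⟨m, hm⟩ : ∃ m, PySem.List.max? buckets.keys (fun y => y) = some m := by
    cases hmx : PySem.List.max? buckets.keys (fun y => y) with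
    | none => exact absurd ((PySem.List.max?_eq_none_iff _ _).mp hmx) hknil
    | some m => exact ⟨m, rfl⟩
  rw [hm]
  simp only [Option.getD_some]
  have hle : ∀ p ∈ P, p.2 ≤ m := by
    intro p hp
    refine PySem.List.max?_isMax hm p.2 ?_
    rw [hkeys, PySem.Set.mem_ofList]
    exact List.mem_map_of_mem hp
  have hm5 : 5 ≤ m := by
    have hmem := PySem.List.max?_mem hm
    rw [hkeys, PySem.Set.mem_ofList, List.mem_map] at hmem
    obtain ⟨p, hp, rfl⟩ := hmem
    exact hP5 p hp
  -- the countdown range is strictly descending and covers every length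
  have hpw : (PySem.List.pyRange m 4 (-1)).Pairwise (· > ·) := by
    rw [PySem.List.pyRange_neg_one_eq_reverse]
    exact List.pairwise_reverse.mpr (PySem.List.pairwise_lt_pyRange_one _ _)
  have hcov : ∀ p ∈ P, p.2 ∈ PySem.List.pyRange m 4 (-1) := by
    intro p hp
    rw [PySem.List.mem_pyRange_neg_one]
    exact ⟨by have := hP5 p hp; omega, hle p hp⟩
  -- the pair loop is the bucket concatenation
  rw [PySem.List.foldl_congr_mem (PySem.List.pyRange m 4 (-1)) _
    (fun acc n => acc ++ (buckets.getD n []).map (fun w => (w, n))) []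
    (fun acc n _ => PySem.List.foldl_append_singleton_eq_map _ _ _)]
  rw [PySem.List.foldl_append_eq_flatMap, List.nil_append]
  have hbump : ∀ n ∈ PySem.List.pyRange m 4 (-1),
      (buckets.getD n []).map (fun w => (w, n)) = P.filter (fun p => p.2 == n) := by
    intro n _
    rw [hgetD n, List.map_map]
    have : ((fun w => (w, n)) ∘ fun p : String × Int => p.1) = fun p : String × Int => (p.1, n) := rfl
    rw [this]
    have := List.map_congr_left (l := P.filter (fun p => p.2 == n))
      (f := fun p : String × Int => (p.1, n)) (g := fun p => p)
      (fun p hp => by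
        rw [List.mem_filter] at hp
        have h2 : p.2 = n := beq_iff_eq.mp hp.2
        rw [← h2])
    rw [this]
    exact List.map_id' _
  rw [List.flatMap_congr hbump, ← pv_sorted_eq_buckets P _ hpw hcov]
  exact pv_items_ofList (pv_nodup_keys_sorted words)

-- ===== VERDICT (by name: the statement is the Claim_ definition above) =====
theorem process_word_list_spec : Claim_equal_process_word_list := by
  intro words _
  unfold Spec_process_word_list
  by_cases h : pvP words = []
  · have hA := pv_A_eq words
    rw [h, (PySem.List.sorted_eq_nil_iff _ _ _).mpr rfl] at hA
    rw [hA]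
    symm
    simp only [process_word_list_alt]
    rw [pv_kept_items words, h, if_pos rfl]
  · rw [pv_A_eq, pv_B_eq words h]
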